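-- pv_equiv track=rewrite | github.com/meenalsawant017/LeetCode_Problems | CodeSignal/Sum of minimum and maximum elements of all subarrays of size k.py | minMaxSubArray
-- ===== SOURCE A (Python) =====
-- def minMaxSubArray(nums, k):
--         curr_total = 0
--         globalMax = 0
--         output = []
--
--         for i in range(len(nums)):
--             temp = nums[i : i+k]
--             min_ = min(temp)
--             max_ = max(temp)
--             curr_total = min_ + max_
--             if len(nums[i : i+k]) == k:
--                   globalMax += curr_total
--         return globalMax
-- ===== SOURCE B (Python) =====
-- def minMaxSubArray(nums, k):
--     # Amortized O(n) sliding-window min/max via a queue of two stacks, each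
--     # entry caching the min and max of itself and everything below it.
--     back = []    # newest end of the window; (value, min_below, max_below)
--     front = []   # oldest end of the window, built by flushing back
--     total = 0
--     for x in nums:
--         back.append((x, min(x, back[-1][1]) if back else x,
--                         max(x, back[-1][2]) if back else x))
--         if len(front) + len(back) == k:
--             if not front:
--                 while back:
--                     v = back.pop()[0]
--                     front.append((v, min(v, front[-1][1]) if front else v,
--                                      max(v, front[-1][2]) if front else v))
--             mn = front[-1][1] if not back else min(front[-1][1], back[-1][1])
--             mx = front[-1][2] if not back else max(front[-1][2], back[-1][2])
--             total += mn + mx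
--             front.pop()
--     return total
-- ===== Notes on version B (the rewrite author's own statement) =====
-- stated objective: faster
-- what changed: Replaced the per-index slice + min() + max() rescan of every window by a two-stack min/max queue (each stack entry caches the min and max of everything below it), so each element is pushed and popped once and every window's min+max is read in O(1) amortized.
import Mathlib
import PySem

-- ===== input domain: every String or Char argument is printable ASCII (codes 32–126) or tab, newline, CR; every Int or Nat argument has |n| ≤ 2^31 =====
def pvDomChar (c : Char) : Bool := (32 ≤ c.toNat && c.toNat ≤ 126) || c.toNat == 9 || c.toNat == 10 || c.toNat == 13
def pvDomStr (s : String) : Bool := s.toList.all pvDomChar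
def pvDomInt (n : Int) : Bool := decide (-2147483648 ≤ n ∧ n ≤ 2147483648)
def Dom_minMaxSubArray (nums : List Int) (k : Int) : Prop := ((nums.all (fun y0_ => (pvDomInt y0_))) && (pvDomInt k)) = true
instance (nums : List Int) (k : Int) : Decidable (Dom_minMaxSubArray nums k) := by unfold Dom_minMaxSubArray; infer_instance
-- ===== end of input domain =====

-- B replaces A's per-index slice + min()/max() rescan of every window by a two-stack
-- min/max queue (amortized O(1) per element); equivalence proved on Pre_ (A raises
-- ValueError on nonempty nums with k <= 0: min() of an empty slice).


-- ===== PORT A =====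
-- literal port of A; min()/max() of an empty slice raise in Python (PySem min?/max?
-- return none there), so `.getD 0` is only reached outside Pre_.
def stepA (nums : List Int) (k : Int) (st : Int × Int × List Int) (i : Nat) : Int × Int × List Int :=
  let temp := PySem.List.slice nums (some (i : Int)) (some ((i : Int) + k))
  let min_ := (PySem.List.min? temp (fun y => y)).getD 0
  let max_ := (PySem.List.max? temp (fun y => y)).getD 0
  let curr_total := min_ + max_
  if ((PySem.List.slice nums (some (i : Int)) (some ((i : Int) + k))).length : Int) = k then
    (curr_total, st.2.1 + curr_total, st.2.2)
  else
    (curr_total, st.2.1, st.2.2)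

def minMaxSubArray (nums : List Int) (k : Int) : Int :=
  ((List.range nums.length).foldl (stepA nums k) (0, 0, ([] : List Int))).2.1

-- ===== PORT B =====
-- stacks are Lean lists with the TOP AT THE HEAD; entry = (value, min below, max below)
def pushS (x : Int) (s : List (Int × Int × Int)) : List (Int × Int × Int) :=
  match s with
  | [] => [(x, x, x)]
  | (_, m, M) :: _ => (x, min x m, max x M) :: s

def flushS : List (Int × Int × Int) → List (Int × Int × Int) → List (Int × Int × Int)
  | [], front => front
  | (v, _, _) :: rest, front => flushS rest (pushS v front)

def loopB (k : Int) : List Int → List (Int × Int × Int) → List (Int × Int × Int) → Int → Int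
  | [], _back, _front, total => total
  | x :: rest, back, front, total =>
    let back1 := pushS x back
    if (((front.length + back1.length : Nat) : Int) = k) then
      let front1 := if front.isEmpty then flushS back1 [] else front
      let back2 := if front.isEmpty then [] else back1
      match front1 with
      | [] => loopB k rest back2 [] total  -- unreachable when the size condition holds
      | (_, fm, fM) :: frest =>
        let mn := match back2 with | [] => fm | (_, bm, _) :: _ => min fm bm
        let mx := match back2 with | [] => fM | (_, _, bM) :: _ => max fM bM
        loopB k rest back2 frest (total + (mn + mx))
    else
      loopB k rest back1 front total

def minMaxSubArray_alt (nums : List Int) (k : Int) : Int := loopB k nums [] [] 0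

-- ===== PRECONDITION & SPEC =====
-- Pre_ excludes exactly the inputs where Python A raises: nonempty nums with k ≤ 0
-- (min() of the empty slice nums[i:i+k] raises ValueError).
def Pre_minMaxSubArray (nums : List Int) (k : Int) : Prop := nums = [] ∨ 1 ≤ k
instance (nums : List Int) (k : Int) : Decidable (Pre_minMaxSubArray nums k) := by unfold Pre_minMaxSubArray; infer_instance
def pvWitness_minMaxSubArray : List Int × Int := ([1, 3, -2, 5], 2)

def Spec_minMaxSubArray (nums : List Int) (k : Int) (out : Int) : Prop := out = minMaxSubArray_alt nums k
instance (nums : List Int) (k : Int) (out : Int) : Decidable (Spec_minMaxSubArray nums k out) := by unfold Spec_minMaxSubArray; infer_instance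

-- ===== CLAIM (what is proved, stated in full; the proofs are below) =====
def Claim_equal_minMaxSubArray : Prop := ∀ (nums : List Int) (k : Int), Dom_minMaxSubArray nums k → Pre_minMaxSubArray nums k → Spec_minMaxSubArray nums k (minMaxSubArray nums k)

-- ===== LEMMAS AND PROOFS =====

-- running min/max of a nonempty list, seeded with its first element
def minV (a : Int) (l : List Int) : Int := l.foldl min a
def maxV (a : Int) (l : List Int) : Int := l.foldl max a
-- min(l) + max(l) of a nonempty list (0 for [], never used there)
def mmNe : List Int → Int
  | [] => 0
  | a :: t => minV a t + maxV a t

-- the values held by a stack, top first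
def valsS (s : List (Int × Int × Int)) : List Int := s.map (·.1)

-- well-formed stack: each cached pair is the min/max of its value and everything below
def wfS : List (Int × Int × Int) → Prop
  | [] => True
  | (v, m, M) :: rest => m = minV v (valsS rest) ∧ M = maxV v (valsS rest) ∧ wfS rest

-- A-side recursive sum: min+max of every full k-window, peeling suffixes
def aSum (k : Int) : List Int → Int
  | [] => 0
  | x :: rest =>
      (if (((x :: rest).take k.toNat).length : Int) = k then mmNe ((x :: rest).take k.toNat) else 0)
      + aSum k rest

-- B-side spec: current (not yet full) window w, remaining input
def winSum (k : Int) : List Int → List Int → Int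
  | _, [] => 0
  | w, x :: rest =>
      if (((w ++ [x]).length : Int) = k) then
        mmNe (w ++ [x]) + winSum k (w ++ [x]).tail rest
      else
        winSum k (w ++ [x]) rest

theorem minV_min (c a : Int) (l : List Int) : min c (minV a l) = minV (min c a) l := by
  induction l generalizing a with
  | nil => simp [minV]
  | cons b t ih => simp only [minV, List.foldl_cons] at *; rw [ih, min_assoc]

theorem maxV_max (c a : Int) (l : List Int) : max c (maxV a l) = maxV (max c a) l := by
  induction l generalizing a with
  | nil => simp [maxV]
  | cons b t ih => simp only [maxV, List.foldl_cons] at *; rw [ih, max_assoc]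

theorem minV_append (a : Int) (l1 l2 : List Int) : minV a (l1 ++ l2) = minV (minV a l1) l2 := by
  simp [minV, List.foldl_append]

theorem maxV_append (a : Int) (l1 l2 : List Int) : maxV a (l1 ++ l2) = maxV (maxV a l1) l2 := by
  simp [maxV, List.foldl_append]

theorem minV_reverse (a : Int) (l : List Int) : minV a l.reverse = minV a l := by
  induction l generalizing a with
  | nil => rfl
  | cons b t ih =>
      rw [List.reverse_cons, minV_append]
      show min (minV a t.reverse) b = minV a (b :: t)
      rw [ih]
      show min (minV a t) b = minV (min a b) t
      rw [min_comm (minV a t) b, minV_min, min_comm b a]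

theorem maxV_reverse (a : Int) (l : List Int) : maxV a l.reverse = maxV a l := by
  induction l generalizing a with
  | nil => rfl
  | cons b t ih =>
      rw [List.reverse_cons, maxV_append]
      show max (maxV a t.reverse) b = maxV a (b :: t)
      rw [ih]
      show max (maxV a t) b = maxV (max a b) t
      rw [max_comm (maxV a t) b, maxV_max, max_comm b a]

theorem valsS_push (x : Int) (s : List (Int × Int × Int)) : valsS (pushS x s) = x :: valsS s := by
  cases s with
  | nil => rfl
  | cons h t => obtain ⟨v, m, M⟩ := h; rfl

theorem pushS_ne_nil (x : Int) (s : List (Int × Int × Int)) : pushS x s ≠ [] := by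
  cases s with
  | nil => simp [pushS]
  | cons h t => obtain ⟨v, m, M⟩ := h; simp [pushS]

theorem wfS_push (x : Int) (s : List (Int × Int × Int)) (h : wfS s) : wfS (pushS x s) := by
  cases s with
  | nil => simp [pushS, wfS, minV, maxV, valsS]
  | cons hd t =>
      obtain ⟨v, m, M⟩ := hd
      obtain ⟨hm, hM, ht⟩ := h
      refine ⟨?_, ?_, hm, hM, ht⟩
      · show min x m = minV x (valsS ((v, m, M) :: t))
        rw [hm, minV_min]
        simp [valsS, minV]
      · show max x M = maxV x (valsS ((v, m, M) :: t))
        rw [hM, maxV_max]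
        simp [valsS, maxV]

theorem valsS_flush (b f : List (Int × Int × Int)) : valsS (flushS b f) = (valsS b).reverse ++ valsS f := by
  induction b generalizing f with
  | nil => simp [flushS, valsS]
  | cons hd t ih =>
      obtain ⟨v, m, M⟩ := hd
      rw [flushS, ih, valsS_push]
      simp [valsS]

theorem wfS_flush (b f : List (Int × Int × Int)) (h : wfS f) : wfS (flushS b f) := by
  induction b generalizing f with
  | nil => exact h
  | cons hd t ih =>
      obtain ⟨v, m, M⟩ := hd
      exact ih _ (wfS_push v f h)

theorem aSum_small (k : Int) (l : List Int) (hk : 1 ≤ k) (h : l.length < k.toNat) : aSum k l = 0 := by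
  induction l with
  | nil => rfl
  | cons x rest ih =>
      have h1 : rest.length < k.toNat := by simp only [List.length_cons] at h; omega
      rw [aSum, ih h1]
      have hthis : ¬ ((((x :: rest).take k.toNat).length : Int) = k) := by
        rw [List.take_of_length_le (le_of_lt h)]
        simp only [List.length_cons] at h ⊢
        omega
      rw [if_neg hthis, add_zero]
theorem winSum_eq_aSum (k : Int) (hk : 1 ≤ k) :
    ∀ (rest w : List Int), (w.length : Int) ≤ k - 1 → winSum k w rest = aSum k (w ++ rest) := by
  intro rest
  induction rest with
  | nil =>
      intro w hw
      rw [winSum, List.append_nil]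
      exact (aSum_small k w hk (by omega)).symm
  | cons x rest ih =>
      intro w hw
      rw [winSum]
      by_cases hc : (((w ++ [x]).length : Int) = k)
      · rw [if_pos hc]
        have hlen : (w ++ [x]).length = k.toNat := by
          simp only [List.length_append, List.length_singleton] at hc ⊢; omega
        cases w with
        | nil =>
            have hk1 : k = 1 := by simp at hc; omega
            simp only [List.nil_append, aSum]
            have htake : (x :: rest).take k.toNat = [x] := by
              rw [hk1]; rfl
            rw [htake]
            rw [if_pos (by rw [hk1]; rfl)]
            simp only [List.nil_append, List.tail_cons]
            rw [ih [] (by simp; omega)]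
            simp
        | cons y w0 =>
            have htail : ((y :: w0) ++ [x]).tail = w0 ++ [x] := by simp
            have hlen2 : (((w0 ++ [x]).length : Nat) : Int) ≤ k - 1 := by
              simp only [List.length_append, List.length_cons, List.length_singleton] at hlen ⊢
              omega
            rw [htail, ih (w0 ++ [x]) hlen2]
            have h2 : (w0 ++ [x]) ++ rest = w0 ++ x :: rest := by simp
            have h3 : (y :: w0) ++ x :: rest = y :: (w0 ++ x :: rest) := by simp
            rw [h2, h3]
            simp only [aSum]
            have htake : (y :: (w0 ++ x :: rest)).take k.toNat = (y :: w0) ++ [x] := by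
              have h4 : y :: (w0 ++ x :: rest) = ((y :: w0) ++ [x]) ++ rest := by simp
              rw [h4]
              exact List.take_left' hlen
            rw [htake]
            have hcond : ((((y :: w0) ++ [x]).length : Nat) : Int) = k := by rw [hlen]; omega
            rw [if_pos hcond]
      · rw [if_neg hc]
        rw [ih (w ++ [x]) (by simp only [List.length_append, List.length_singleton] at hw hc ⊢; push_cast; omega)]
        congr 1
        simp
def gTerm (nums : List Int) (k : Int) (i : Nat) : Int :=
  if ((PySem.List.slice nums (some (i : Int)) (some ((i : Int) + k))).length : Int) = k then
    (PySem.List.min? (PySem.List.slice nums (some (i : Int)) (some ((i : Int) + k))) (fun y => y)).getD 0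
    + (PySem.List.max? (PySem.List.slice nums (some (i : Int)) (some ((i : Int) + k))) (fun y => y)).getD 0
  else 0

theorem stepA_fold (nums : List Int) (k : Int) :
    ∀ (l : List Nat) (st : Int × Int × List Int),
      (l.foldl (stepA nums k) st).2.1 = st.2.1 + (l.map (gTerm nums k)).sum := by
  intro l
  induction l with
  | nil => intro st; simp
  | cons i l ih =>
      intro st
      rw [List.foldl_cons, ih, List.map_cons, List.sum_cons]
      have h : (stepA nums k st i).2.1 = st.2.1 + gTerm nums k i := by
        simp only [stepA, gTerm]
        split_ifs with hcnd
        · rfl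
        · simp
      rw [h]
      ring

theorem mm_getD (t : List Int) :
    (PySem.List.min? t (fun y => y)).getD 0 + (PySem.List.max? t (fun y => y)).getD 0 = mmNe t := by
  cases t with
  | nil => rfl
  | cons a t =>
      rw [PySem.List.min?_id_cons, PySem.List.max?_id_cons]
      simp [mmNe, minV, maxV]

theorem gTerm_eq (nums : List Int) (k : Int) (hk : 1 ≤ k) (i : Nat) :
    gTerm nums k i
      = (if (((nums.drop i).take k.toNat).length : Int) = k then mmNe ((nums.drop i).take k.toNat) else 0) := by
  have hs : PySem.List.slice nums (some (i : Int)) (some ((i : Int) + k)) = (nums.drop i).take k.toNat := by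
    have hk' : (i : Int) + k = (i : Int) + ((k.toNat : Nat) : Int) := by omega
    rw [hk', PySem.List.slice_natCast_add]
  rw [gTerm, hs, mm_getD]

theorem sumRange (k : Int) :
    ∀ (l : List Int),
      ((List.range l.length).map
        (fun i => if (((l.drop i).take k.toNat).length : Int) = k then mmNe ((l.drop i).take k.toNat) else 0)).sum
      = aSum k l := by
  intro l
  induction l with
  | nil => rfl
  | cons x rest ih =>
      rw [List.length_cons, List.range_succ_eq_map, List.map_cons, List.map_map, List.sum_cons]
      rw [aSum]
      have htail : (List.range rest.length).map
            ((fun i => if ((((x :: rest).drop i).take k.toNat).length : Int) = k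
                       then mmNe (((x :: rest).drop i).take k.toNat) else 0) ∘ Nat.succ)
          = (List.range rest.length).map
            (fun i => if (((rest.drop i).take k.toNat).length : Int) = k
                      then mmNe ((rest.drop i).take k.toNat) else 0) := by
        apply List.map_congr_left
        intro i _
        simp [Function.comp, List.drop_succ_cons]
      rw [htail, ih]
      simp

theorem portA_eq_aSum (nums : List Int) (k : Int) (hk : 1 ≤ k) : minMaxSubArray nums k = aSum k nums := by
  unfold minMaxSubArray
  rw [stepA_fold nums k (List.range nums.length) (0, 0, [])]
  have hmap : (List.range nums.length).map (gTerm nums k)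
      = (List.range nums.length).map
          (fun i => if (((nums.drop i).take k.toNat).length : Int) = k then mmNe ((nums.drop i).take k.toNat) else 0) := by
    apply List.map_congr_left
    intro i _
    exact gTerm_eq nums k hk i
  rw [hmap, sumRange k nums]
  ring
theorem mmNe_cons_eq (v : Int) (t : List Int) : mmNe (v :: t) = minV v t + maxV v t := rfl

theorem loopB_eq (k : Int) (hk : 1 ≤ k) :
    ∀ (rest : List Int) (back front : List (Int × Int × Int)) (total : Int),
      wfS back → wfS front →
      (((valsS front ++ (valsS back).reverse).length : Int) ≤ k - 1) →
      loopB k rest back front total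
        = total + winSum k (valsS front ++ (valsS back).reverse) rest := by
  intro rest
  induction rest with
  | nil =>
      intro back front total _ _ _
      rw [loopB, winSum, add_zero]
  | cons x rest ih =>
      intro back front total hwb hwf hlen
      have hwb1 : wfS (pushS x back) := wfS_push x back hwb
      have hvb1 : valsS (pushS x back) = x :: valsS back := valsS_push x back
      have hlb1 : (pushS x back).length = back.length + 1 := by
        have h := congrArg List.length hvb1
        simpa [valsS] using h
      rcases front with _ | ⟨⟨v, fm, fM⟩, frest⟩
      · -- front = []
        by_cases hc : (((List.length ([] : List (Int × Int × Int)) + (pushS x back).length : Nat) : Int) = k)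
        · -- window becomes full: flush, read, pop
          have hkk : (back.length : Int) + 1 = k := by
            rw [hlb1] at hc
            simp only [List.length_nil, Nat.zero_add] at hc
            push_cast at hc
            omega
          have hvf : valsS (flushS (pushS x back) []) = (valsS back).reverse ++ [x] := by
            rw [valsS_flush, hvb1]
            simp [valsS]
          rcases hfl : flushS (pushS x back) [] with _ | ⟨⟨fv, ffm, ffM⟩, f1t⟩
          · rw [hfl] at hvf
            simp [valsS] at hvf
          · have hwfl : wfS (flushS (pushS x back) []) := wfS_flush _ _ trivial
            rw [hfl] at hwfl hvf
            obtain ⟨hffm, hffM, hf1t⟩ := hwfl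
            have hlf : f1t.length = back.length := by
              have h := congrArg List.length hvf
              simp only [valsS, List.length_map, List.length_append, List.length_reverse,
                List.length_cons, List.length_nil] at h
              omega
            have hgoal : loopB k (x :: rest) back [] total
                = loopB k rest [] f1t (total + (ffm + ffM)) := by
              simp only [loopB, List.isEmpty_nil, if_true, hfl, if_pos hc]
            rw [hgoal]
            rw [ih [] f1t (total + (ffm + ffM)) trivial hf1t ?hl1]
            case hl1 =>
              simp only [valsS, List.length_map, List.length_append, List.length_reverse,
                List.length_cons, List.length_nil]
              omega
            rw [show valsS ([] : List (Int × Int × Int)) ++ (valsS back).reverse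
                  = (valsS back).reverse from by simp [valsS]]
            rw [winSum]
            rw [if_pos (show ((((valsS back).reverse ++ [x]).length : Nat) : Int) = k from by
              simp only [valsS, List.length_map, List.length_append, List.length_reverse,
                List.length_cons, List.length_nil]
              omega)]
            have hwin : (valsS back).reverse ++ [x] = fv :: valsS f1t := hvf.symm
            rw [hwin, mmNe_cons_eq, ← hffm, ← hffM]
            rw [show (fv :: valsS f1t).tail = valsS f1t from rfl]
            rw [show valsS f1t ++ (valsS ([] : List (Int × Int × Int))).reverse = valsS f1t from by
              simp [valsS]]
            ring
        · -- window not yet full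
          have hgoal : loopB k (x :: rest) back [] total = loopB k rest (pushS x back) [] total := by
            simp only [loopB, if_neg hc]
          rw [hgoal]
          have hcN : ¬ ((back.length : Int) + 1 = k) := by
            rw [hlb1] at hc
            simp only [List.length_nil, Nat.zero_add] at hc
            push_cast at hc
            omega
          simp only [valsS, List.length_map, List.length_append, List.length_reverse,
            List.length_cons, List.length_nil] at hlen
          rw [ih (pushS x back) [] total hwb1 trivial ?hl2]
          case hl2 =>
            rw [hvb1]
            simp only [valsS, List.length_map, List.length_append, List.length_reverse,
              List.length_cons, List.length_nil]
            omega
          rw [winSum]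
          rw [if_neg (show ¬ ((((valsS ([] : List (Int × Int × Int)) ++ (valsS back).reverse) ++ [x]).length : Nat) : Int) = k from by
            simp only [valsS, List.length_map, List.length_append, List.length_reverse,
              List.length_cons, List.length_nil]
            omega)]
          rw [show valsS ([] : List (Int × Int × Int)) ++ (valsS (pushS x back)).reverse
                = (valsS ([] : List (Int × Int × Int)) ++ (valsS back).reverse) ++ [x] from by
            rw [hvb1]; simp [valsS]]
      · -- front = (v, fm, fM) :: frest
        obtain ⟨hfm, hfM, hfrest⟩ := hwf
        rcases hb1 : pushS x back with _ | ⟨⟨bv, bm, bM⟩, bt⟩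
        · exact absurd hb1 (pushS_ne_nil x back)
        · rw [hb1] at hwb1 hvb1 hlb1
          obtain ⟨hbm, hbM, hbt⟩ := hwb1
          have hlbt : bt.length = back.length := by
            simp only [List.length_cons] at hlb1
            omega
          simp only [valsS, List.length_map, List.length_append, List.length_reverse,
            List.length_cons, List.length_nil] at hlen
          by_cases hc : ((((v, fm, fM) :: frest).length + ((bv, bm, bM) :: bt).length : Nat) : Int) = k
          · have hkk : (frest.length : Int) + 1 + ((bt.length : Int) + 1) = k := by
              simp only [List.length_cons] at hc
              push_cast at hc
              omega
            have hgoal : loopB k (x :: rest) back ((v, fm, fM) :: frest) total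
                = loopB k rest ((bv, bm, bM) :: bt) frest (total + (min fm bm + max fM bM)) := by
              simp only [loopB, hb1, List.isEmpty_cons, if_false, Bool.false_eq_true, if_pos hc]
            rw [hgoal]
            rw [ih ((bv, bm, bM) :: bt) frest _ ⟨hbm, hbM, hbt⟩ hfrest ?hl3]
            case hl3 =>
              simp only [valsS, List.length_map, List.length_append, List.length_reverse,
                List.length_cons, List.length_nil]
              omega
            rw [winSum]
            rw [if_pos (show ((((valsS ((v, fm, fM) :: frest) ++ (valsS back).reverse) ++ [x]).length : Nat) : Int) = k from by
              simp only [valsS, List.length_map, List.length_append, List.length_reverse,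
                List.length_cons, List.length_nil]
              omega)]
            have hwx : (valsS ((v, fm, fM) :: frest) ++ (valsS back).reverse) ++ [x]
                = v :: (valsS frest ++ (valsS ((bv, bm, bM) :: bt)).reverse) := by
              rw [hvb1]
              simp [valsS]
            rw [hwx, mmNe_cons_eq]
            have hmn : minV v (valsS frest ++ (valsS ((bv, bm, bM) :: bt)).reverse) = min fm bm := by
              rw [minV_append, minV_reverse, ← hfm]
              show minV fm (valsS ((bv, bm, bM) :: bt)) = min fm bm
              rw [show valsS ((bv, bm, bM) :: bt) = bv :: valsS bt from rfl]
              show minV (min fm bv) (valsS bt) = min fm bm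
              rw [hbm, minV_min]
            have hmx : maxV v (valsS frest ++ (valsS ((bv, bm, bM) :: bt)).reverse) = max fM bM := by
              rw [maxV_append, maxV_reverse, ← hfM]
              show maxV fM (valsS ((bv, bm, bM) :: bt)) = max fM bM
              rw [show valsS ((bv, bm, bM) :: bt) = bv :: valsS bt from rfl]
              show maxV (max fM bv) (valsS bt) = max fM bM
              rw [hbM, maxV_max]
            rw [hmn, hmx]
            rw [show (v :: (valsS frest ++ (valsS ((bv, bm, bM) :: bt)).reverse)).tail
                  = valsS frest ++ (valsS ((bv, bm, bM) :: bt)).reverse from rfl]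
            ring
          · have hcN : ¬ ((frest.length : Int) + 1 + ((bt.length : Int) + 1) = k) := by
              simp only [List.length_cons] at hc
              push_cast at hc
              omega
            have hgoal : loopB k (x :: rest) back ((v, fm, fM) :: frest) total
                = loopB k rest ((bv, bm, bM) :: bt) ((v, fm, fM) :: frest) total := by
              simp only [loopB, hb1, List.isEmpty_cons, if_false, Bool.false_eq_true, if_neg hc]
            rw [hgoal]
            rw [ih ((bv, bm, bM) :: bt) ((v, fm, fM) :: frest) total ⟨hbm, hbM, hbt⟩ ⟨hfm, hfM, hfrest⟩ ?hl4]
            case hl4 =>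
              simp only [valsS, List.length_map, List.length_append, List.length_reverse,
                List.length_cons, List.length_nil]
              omega
            rw [winSum]
            rw [if_neg (show ¬ ((((valsS ((v, fm, fM) :: frest) ++ (valsS back).reverse) ++ [x]).length : Nat) : Int) = k from by
              simp only [valsS, List.length_map, List.length_append, List.length_reverse,
                List.length_cons, List.length_nil]
              omega)]
            rw [show valsS ((v, fm, fM) :: frest) ++ (valsS ((bv, bm, bM) :: bt)).reverse
                  = (valsS ((v, fm, fM) :: frest) ++ (valsS back).reverse) ++ [x] from by
              rw [hvb1]
              simp [valsS]]
-- ===== VERDICT (by name: the statement is the Claim_ definition above) =====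
theorem minMaxSubArray_spec : Claim_equal_minMaxSubArray := by
  intro nums k _hd hpre
  unfold Spec_minMaxSubArray
  rcases hpre with h | hk
  · subst h; rfl
  · have hA := portA_eq_aSum nums k hk
    have hB := loopB_eq k hk nums [] [] 0 trivial trivial (by simp [valsS]; omega)
    have hW := winSum_eq_aSum k hk nums [] (by simp; omega)
    simp [valsS] at hB
    simp only [minMaxSubArray_alt]
    rw [hA, hB, hW]
    simp
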